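-- pv_equiv track=rewrite | github.com/jsernalunaceei/net-audit-automation | src/auditool/orchestrator.py | extract_host_blocks
-- ===== SOURCE A (Python) =====
-- def extract_host_blocks(nmap_text: str) -> list[list[str]]:
--     """
--     Split Nmap normal output into blocks, one per host.
--     Each block starts with 'Nmap scan report for ...'
--     """
--     lines = nmap_text.splitlines()
--     blocks: list[list[str]] = []
--     current_block: list[str] = []
--
--     for line in lines:
--         if line.startswith("Nmap scan report for"):
--             if current_block:
--                 blocks.append(current_block)
--             current_block = [line]
--         else:
--             if current_block:
--                 current_block.append(line)
--
--     if current_block: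
--         blocks.append(current_block)
--
--     return blocks
-- ===== SOURCE B (Python) =====
-- HDR = "Nmap scan report for"
--
--
-- def extract_host_blocks(nmap_text: str) -> list[list[str]]:
--     """
--     Split Nmap normal output into blocks, one per host.
--     Drop everything before the first header, then repeatedly split off
--     one whole host block (header + following non-header lines).
--     """
--     rest = nmap_text.splitlines()
--     while rest and not rest[0].startswith(HDR):
--         rest = rest[1:]
--     blocks: list[list[str]] = []
--     while rest:
--         header, rest = rest[0], rest[1:]
--         body: list[str] = []
--         while rest and not rest[0].startswith(HDR):
--             body.append(rest[0])
--             rest = rest[1:]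
--         blocks.append([header] + body)
--     return blocks
-- ===== Notes on version B (the rewrite author's own statement) =====
-- stated objective: alternative
-- what changed: B first skips all lines before the first header line, then repeatedly splits off one whole host block (header plus following non-header lines) per outer iteration, instead of A's single pass that maintains a current_block accumulator and flushes it on each header.
import Mathlib
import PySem

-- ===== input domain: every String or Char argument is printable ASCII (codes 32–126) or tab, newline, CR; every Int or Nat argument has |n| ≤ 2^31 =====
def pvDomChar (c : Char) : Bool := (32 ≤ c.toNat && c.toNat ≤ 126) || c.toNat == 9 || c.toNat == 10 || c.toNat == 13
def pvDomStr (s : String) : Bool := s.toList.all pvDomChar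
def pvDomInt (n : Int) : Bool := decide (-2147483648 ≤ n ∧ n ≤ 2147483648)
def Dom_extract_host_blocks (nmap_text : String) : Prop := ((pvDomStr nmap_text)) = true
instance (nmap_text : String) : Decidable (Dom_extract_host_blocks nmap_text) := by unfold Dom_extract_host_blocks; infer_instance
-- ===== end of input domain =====

-- B drops lines before the first header, then repeatedly splits off one whole host block
-- (header + following non-header lines) per outer step, instead of A's flush-on-header
-- accumulator pass; objective: alternative decomposition, same return value.

-- ===== PORT A =====
-- the body of A's for-loop, as the fold step over (blocks, current_block)
def pvStepA (st : List (List String) × List String) (line : String) :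
    List (List String) × List String :=
  if PySem.Str.startswith line "Nmap scan report for" then
    (if st.2 ≠ [] then st.1 ++ [st.2] else st.1, [line])
  else
    (st.1, if st.2 ≠ [] then st.2 ++ [line] else st.2)

def extract_host_blocks (nmap_text : String) : List (List String) :=
  let lines := PySem.Str.splitlines nmap_text
  let st := lines.foldl pvStepA ([], [])
  if st.2 ≠ [] then st.1 ++ [st.2] else st.1

-- ===== PORT B =====
-- while rest and not rest[0].startswith(HDR): rest = rest[1:]
def pvDropPre : List String → List String
  | [] => []
  | l :: ls => if PySem.Str.startswith l "Nmap scan report for" then l :: ls else pvDropPre ls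

-- the inner while-loop: collects body and returns the remaining rest
def pvTakeBody : List String → List String × List String
  | [] => ([], [])
  | l :: ls =>
    if PySem.Str.startswith l "Nmap scan report for" then ([], l :: ls)
    else
      let p := pvTakeBody ls
      (l :: p.1, p.2)

theorem pvTakeBody_rest_le (ls : List String) : (pvTakeBody ls).2.length ≤ ls.length := by
  induction ls with
  | nil => simp [pvTakeBody]
  | cons l ls ih =>
    simp only [pvTakeBody]
    split
    · simp
    · simpa using Nat.le_succ_of_le ih

-- the outer while-loop over rest, with the blocks accumulator
def pvOuter : List String → List (List String) → List (List String)
  | [], blocks => blocks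
  | l :: ls, blocks =>
    let p := pvTakeBody ls
    pvOuter p.2 (blocks ++ [l :: p.1])
termination_by rest _ => rest.length
decreasing_by exact Nat.lt_succ_of_le (pvTakeBody_rest_le ls)

def extract_host_blocks_alt (nmap_text : String) : List (List String) :=
  pvOuter (pvDropPre (PySem.Str.splitlines nmap_text)) []

-- ===== PRECONDITION & SPEC =====
def Spec_extract_host_blocks (nmap_text : String) (out : List (List String)) : Prop := out = extract_host_blocks_alt nmap_text
instance (nmap_text : String) (out : List (List String)) : Decidable (Spec_extract_host_blocks nmap_text out) := by unfold Spec_extract_host_blocks; infer_instance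

-- ===== CLAIM (what is proved, stated in full; the proofs are below) =====
def Claim_equal_extract_host_blocks : Prop := ∀ (nmap_text : String), Dom_extract_host_blocks nmap_text → Spec_extract_host_blocks nmap_text (extract_host_blocks nmap_text)

-- ===== LEMMAS AND PROOFS =====

theorem pvOuter_acc (rest : List String) : ∀ blocks : List (List String),
    pvOuter rest blocks = blocks ++ pvOuter rest [] := by
  induction hl : rest.length using Nat.strong_induction_on generalizing rest with
  | _ n ih =>
    match rest with
    | [] => intro b; simp [pvOuter]
    | l :: ls =>
      intro b
      have hlen : (pvTakeBody ls).2.length < n := by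
        subst hl; exact Nat.lt_succ_of_le (pvTakeBody_rest_le ls)
      simp only [pvOuter]
      rw [ih _ hlen _ rfl (b ++ [l :: (pvTakeBody ls).1]),
          ih _ hlen _ rfl ([] ++ [l :: (pvTakeBody ls).1])]
      simp

-- the fold with a nonempty current block builds current ++ body, then the remaining blocks
theorem pvFold_nonempty (lines : List String) : ∀ (b : List (List String)) (c : List String), c ≠ [] →
    (let st := lines.foldl pvStepA (b, c); if st.2 ≠ [] then st.1 ++ [st.2] else st.1)
      = b ++ [c ++ (pvTakeBody lines).1] ++ pvOuter (pvTakeBody lines).2 [] := by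
  induction lines with
  | nil => intro b c hc; simp [pvTakeBody, pvOuter, hc]
  | cons l ls ih =>
    intro b c hc
    by_cases h : PySem.Str.startswith l "Nmap scan report for" = true
    · have hstep : pvStepA (b, c) l = (b ++ [c], [l]) := by
        simp only [pvStepA, h]; simp [hc]
      have htb : pvTakeBody (l :: ls) = ([], l :: ls) := by
        simp only [pvTakeBody, h]; simp
      rw [List.foldl_cons, hstep, ih (b ++ [c]) [l] (by simp), htb]
      simp only [pvOuter]
      rw [pvOuter_acc (pvTakeBody ls).2 ([] ++ [l :: (pvTakeBody ls).1])]
      simp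
    · have hstep : pvStepA (b, c) l = (b, c ++ [l]) := by
        simp only [pvStepA, h]; simp [hc]
      have htb : pvTakeBody (l :: ls) = (l :: (pvTakeBody ls).1, (pvTakeBody ls).2) := by
        simp only [pvTakeBody, h]; simp
      rw [List.foldl_cons, hstep, ih b (c ++ [l]) (by simp), htb]
      simp

-- the fold with an empty current block drops lines up to the first header
theorem pvFold_empty (lines : List String) : ∀ (b : List (List String)),
    (let st := lines.foldl pvStepA (b, []); if st.2 ≠ [] then st.1 ++ [st.2] else st.1)
      = b ++ pvOuter (pvDropPre lines) [] := by
  induction lines with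
  | nil => intro b; simp [pvDropPre, pvOuter]
  | cons l ls ih =>
    intro b
    by_cases h : PySem.Str.startswith l "Nmap scan report for" = true
    · have hstep : pvStepA (b, []) l = (b, [l]) := by
        simp only [pvStepA, h]; simp
      have hdp : pvDropPre (l :: ls) = l :: ls := by
        simp only [pvDropPre, h]; simp
      rw [List.foldl_cons, hstep, pvFold_nonempty ls b [l] (by simp), hdp]
      simp only [pvOuter]
      rw [pvOuter_acc (pvTakeBody ls).2 ([] ++ [l :: (pvTakeBody ls).1])]
      simp
    · have hstep : pvStepA (b, []) l = (b, []) := by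
        simp only [pvStepA, h]; simp
      have hdp : pvDropPre (l :: ls) = pvDropPre ls := by
        simp only [pvDropPre, h]; simp
      rw [List.foldl_cons, hstep, ih b, hdp]

-- ===== VERDICT (by name: the statement is the Claim_ definition above) =====
theorem extract_host_blocks_spec : Claim_equal_extract_host_blocks := by
  intro nmap_text _
  unfold Spec_extract_host_blocks extract_host_blocks extract_host_blocks_alt
  simpa using pvFold_empty (PySem.Str.splitlines nmap_text) []
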